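-- pv_equiv track=rewrite | github.com/didididadida/python-learning | python作业/寻求素数.py | f
-- ===== SOURCE A (Python) =====
-- def isprime(n):  #判断素数函数
--     for i in range(2,n):
--         if n % i == 0:
--             return False
--     return True
--
-- def f(n):        #找小于n的素数并求和
--     ls = []
--     a = 0
--     for i in range(2,n+1):
--         if isprime(i) :
--             ls.append(i)
--     ls =sorted(ls)[-10:]
--     return sum(ls)
-- ===== SOURCE B (Python) =====
-- def f(n):
--     # Sum of the ten largest primes <= n: scan downward, trial division up to sqrt.
--     def isp(k):
--         d = 2
--         while d * d <= k:
--             if k % d == 0: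
--                 return False
--             d += 1
--         return True
--     primes = [i for i in range(n, 1, -1) if isp(i)]
--     return sum(primes[:10])
-- ===== Notes on version B (the rewrite author's own statement) =====
-- stated objective: faster
-- what changed: A scans 2..n upward testing each i by trial division over all of 2..i-1, then sorts and slices the last ten; B scans downward from n with sqrt-bounded trial division (d*d <= k), needing no sort, and sums the first ten primes found.
import Mathlib
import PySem

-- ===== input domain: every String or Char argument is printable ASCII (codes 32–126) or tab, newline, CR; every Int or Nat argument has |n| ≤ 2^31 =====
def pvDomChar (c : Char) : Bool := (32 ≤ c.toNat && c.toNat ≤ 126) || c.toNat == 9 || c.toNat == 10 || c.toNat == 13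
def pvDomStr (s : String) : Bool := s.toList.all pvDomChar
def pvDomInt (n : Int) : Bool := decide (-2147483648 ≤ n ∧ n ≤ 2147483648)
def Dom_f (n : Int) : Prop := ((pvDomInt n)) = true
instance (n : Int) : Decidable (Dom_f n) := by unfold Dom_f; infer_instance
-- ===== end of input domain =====

-- B replaces A's O(n^2) ascending scan with full trial division and a sort by a descending
-- scan with sqrt-bounded trial division, summing the first ten primes found (objective: faster).

-- ===== PORT A =====
-- isprime(n): trial division over range(2, n)
def isprimeA (m : Int) : Bool :=
  (PySem.List.pyRange 2 m 1).foldl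
    (fun ok i => if PySem.Int.mod m i == 0 then false else ok) true

def f (n : Int) : Int :=
  let ls : List Int :=
    (PySem.List.pyRange 2 (n + 1) 1).foldl
      (fun acc i => if isprimeA i then acc ++ [i] else acc) []
  let ls2 := PySem.List.slice (PySem.List.sorted ls (fun x => x) false) (some (-10)) none
  ls2.sum

-- ===== PORT B =====
-- termination fact for the while loop: d*d ≤ k entails d ≤ k
theorem pv_le_mul_self (d : Int) : d ≤ d * d := by nlinarith [sq_nonneg (d - 1), sq_nonneg d]

-- while d*d <= k: if k % d == 0: return False; d += 1 — returns True when the loop exits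
def ispLoop (k d : Int) : Bool :=
  if _h : d * d ≤ k then
    if PySem.Int.mod k d == 0 then false
    else ispLoop k (d + 1)
  else true
termination_by (k + 1 - d).toNat
decreasing_by
  have hd : d ≤ k := le_trans (pv_le_mul_self d) _h
  omega

def f_alt (n : Int) : Int :=
  let primes := (PySem.List.pyRange n 1 (-1)).filter (fun i => ispLoop i 2)
  (primes.take 10).sum   -- primes[:10] with a nonnegative literal bound is take

-- ===== PRECONDITION & SPEC =====
def Spec_f (n : Int) (out : Int) : Prop := out = f_alt n
instance (n : Int) (out : Int) : Decidable (Spec_f n out) := by unfold Spec_f; infer_instance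

-- ===== CLAIM (what is proved, stated in full; the proofs are below) =====
def Claim_equal_f : Prop := ∀ (n : Int), Dom_f n → Spec_f n (f n)

-- ===== LEMMAS AND PROOFS =====

-- B's while loop returns true iff no d' ≥ d with d'*d' ≤ k divides k (for 2 ≤ d)
theorem ispLoop_eq_true_iff (k : Int) : ∀ (d : Int), 2 ≤ d →
    (ispLoop k d = true ↔ ∀ e : Int, d ≤ e → e * e ≤ k → ¬ (e ∣ k)) := by
  intro d
  fun_induction ispLoop k d with
  | case1 d h hmod =>
    intro hd
    simp only [Bool.false_eq_true, false_iff]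
    push Not
    refine ⟨d, le_refl d, h, ?_⟩
    rw [← PySem.Int.mod_eq_zero_iff_dvd]
    simpa using hmod
  | case2 d h hmod ih =>
    intro hd
    rw [ih (by omega)]
    constructor
    · intro h2 e he hee
      rcases eq_or_lt_of_le he with rfl | hlt
      · intro hdvd
        rw [← PySem.Int.mod_eq_zero_iff_dvd] at hdvd
        simp [hdvd] at hmod
      · exact h2 e (by omega) hee
    · intro h2 e he hee
      exact h2 e (by omega) hee
  | case3 d h =>
    intro hd
    simp only [true_iff]
    intro e he hee
    exfalso
    have : d * d ≤ e * e := by nlinarith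
    omega

-- A's isprime is "no divisor in [2, m)"
theorem isprimeA_eq_true_iff (m : Int) :
    isprimeA m = true ↔ ∀ e : Int, 2 ≤ e → e < m → ¬ (e ∣ m) := by
  unfold isprimeA
  rw [PySem.List.foldl_if_false_eq]
  simp only [Bool.true_and, Bool.not_eq_eq_eq_not, Bool.not_true, List.any_eq_false,
    PySem.List.mem_pyRange_one]
  constructor
  · intro h e h2 hlt hdvd
    have := h e ⟨h2, hlt⟩
    rw [← PySem.Int.mod_eq_zero_iff_dvd] at hdvd
    simp [hdvd] at this
  · intro h x ⟨h2, hlt⟩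
    have := h x h2 hlt
    rw [← PySem.Int.mod_eq_zero_iff_dvd] at this
    simpa using this

-- sqrt-bounded trial division agrees with full trial division for m ≥ 2
theorem isp_agree (m : Int) (hm : 2 ≤ m) : ispLoop m 2 = isprimeA m := by
  rw [Bool.eq_iff_iff, ispLoop_eq_true_iff m 2 le_rfl, isprimeA_eq_true_iff]
  constructor
  · intro hA e h2 hlt hdvd
    by_cases hee : e * e ≤ m
    · exact hA e h2 hee hdvd
    · push Not at hee
      obtain ⟨c, hc⟩ := hdvd
      have he0 : 0 < e := by omega
      have hc0 : 0 < c := by nlinarith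
      have hc2 : 2 ≤ c := by
        rcases (by omega : c = 1 ∨ 2 ≤ c) with rfl | h
        · omega
        · exact h
      have hce : c < e := by nlinarith
      have hcc : c * c ≤ m := by nlinarith
      exact hA c hc2 hcc ⟨e, by linarith [hc, mul_comm e c]⟩
  · intro h e h2 hee
    exact h e h2 (by nlinarith)

theorem f_eq_f_alt (n : Int) : f n = f_alt n := by
  unfold f f_alt
  dsimp only
  rw [PySem.List.foldl_append_if_eq_filter, List.nil_append]
  have hLpair : ((PySem.List.pyRange 2 (n + 1) 1).filter isprimeA).Pairwise (· ≤ ·) :=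
    ((PySem.List.pairwise_lt_pyRange_one 2 (n + 1)).filter _).imp le_of_lt
  rw [PySem.List.sorted_eq_self_of_pairwise _ (fun x => x) hLpair,
    PySem.List.slice_from_neg_ofNat _ 10 (by norm_num),
    PySem.List.pyRange_neg_one_eq_reverse, List.filter_reverse]
  have hfc : (PySem.List.pyRange (1 + 1) (n + 1) 1).filter (fun i => ispLoop i 2)
      = (PySem.List.pyRange 2 (n + 1) 1).filter isprimeA := by
    apply List.filter_congr
    intro x hx
    exact isp_agree x (PySem.List.mem_pyRange_one.mp hx).1
  rw [hfc, List.take_reverse, List.sum_reverse]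

-- ===== VERDICT (by name: the statement is the Claim_ definition above) =====
theorem f_spec : Claim_equal_f := by
  intro n _
  unfold Spec_f
  exact f_eq_f_alt n
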